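-- pv_equiv track=rewrite | github.com/LukiLenkiewicz/Python-Coding-Challenges | 6 - Kalkulator dat/main.py | calculate_days
-- ===== SOURCE A (Python) =====
-- MONTHS_IN_REGULAR_YEAR = [31, 28, 31, 30, 31, 30, 31, 31, 30, 31, 30, 31]
--
-- MONTHS_IN_LEAP_YEAR = [31, 29, 31, 30, 31, 30, 31, 31, 30, 31, 30, 31]
--
-- def days_correction(today, given_day):
--     correction = 0
--     if today[0] % 4 == 0 or today[0] % 400 == 0:
--         for month in MONTHS_IN_LEAP_YEAR[:today[1] - 1]:
--             correction += month
--     else: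
--         for month in MONTHS_IN_REGULAR_YEAR[:today[1] - 1]:
--             correction += month
--     if given_day[0] % 4 == 0 or given_day[0] % 400 == 0:
--         for month in MONTHS_IN_LEAP_YEAR[:given_day[1] - 1]:
--             correction -= month
--     else:
--         for month in MONTHS_IN_REGULAR_YEAR[:given_day[1] - 1]:
--             correction -= month
--     return correction + today[2] - given_day[2]
--
-- def calculate_days(today, given_day):
--     days_passed = 0
--     for i in range(today[0] - given_day[0]):
--         if (given_day[0] + i) % 4 == 0 or (given_day[0] + i) % 400 == 0:
--             days_passed += 366
--         else:
--             days_passed += 365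
--     days_passed += days_correction(today, given_day)
--     return days_passed
-- ===== SOURCE B (Python) =====
-- _REGULAR = [31, 28, 31, 30, 31, 30, 31, 31, 30, 31, 30, 31]
-- _LEAP = [31, 29, 31, 30, 31, 30, 31, 31, 30, 31, 30, 31]
--
--
-- def _span_days(y0, y1):
--     """Total number of days in the consecutive years y0, y0+1, ..., y1-1
--     (every fourth year is a leap year)."""
--     if y1 <= y0:
--         return 0
--     return 365 * (y1 - y0) + ((y1 - 1) // 4 - (y0 - 1) // 4)
--
--
-- def _into_year(year, month, day):
--     """Days elapsed in `year` up to `day` of `month`."""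
--     months = _LEAP if year % 4 == 0 else _REGULAR
--     return sum(months[:month - 1]) + day
--
--
-- def calculate_days(today, given_day):
--     return (_span_days(given_day[0], today[0])
--             + _into_year(today[0], today[1], today[2])
--             - _into_year(given_day[0], given_day[1], given_day[2]))
-- ===== Notes on version B (the rewrite author's own statement) =====
-- stated objective: alternative
-- what changed: Replaces A's per-year 365/366 loop by a closed-form day count for the year span (365*Dy plus a floor-division leap count) and decomposes the rest as days-into-year of each date.
import Mathlib
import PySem

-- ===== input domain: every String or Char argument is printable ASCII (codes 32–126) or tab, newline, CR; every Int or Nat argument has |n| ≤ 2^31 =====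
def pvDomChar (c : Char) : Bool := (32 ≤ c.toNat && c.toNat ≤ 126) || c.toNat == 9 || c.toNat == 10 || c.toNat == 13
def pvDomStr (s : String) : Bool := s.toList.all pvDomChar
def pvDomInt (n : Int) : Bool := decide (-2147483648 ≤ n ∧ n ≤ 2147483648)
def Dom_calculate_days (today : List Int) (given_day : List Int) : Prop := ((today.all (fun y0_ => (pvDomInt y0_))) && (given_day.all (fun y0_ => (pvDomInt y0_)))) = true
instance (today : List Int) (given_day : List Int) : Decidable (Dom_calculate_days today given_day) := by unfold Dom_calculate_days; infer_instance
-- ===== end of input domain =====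

-- B replaces A's per-year 365/366 loop by a closed-form leap-year count and a days-into-year decomposition (alternative algorithm).

-- ===== PORT A =====
def MONTHS_IN_REGULAR_YEAR : List Int := [31, 28, 31, 30, 31, 30, 31, 31, 30, 31, 30, 31]
def MONTHS_IN_LEAP_YEAR : List Int := [31, 29, 31, 30, 31, 30, 31, 31, 30, 31, 30, 31]

def days_correction (today : List Int) (given_day : List Int) : Int :=
  let correction : Int := 0
  let correction :=
    if PySem.Int.mod (PySem.List.pyGetD today 0 0) 4 = 0 ∨ PySem.Int.mod (PySem.List.pyGetD today 0 0) 400 = 0 then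
      (PySem.List.slice MONTHS_IN_LEAP_YEAR none (some (PySem.List.pyGetD today 1 0 - 1))).foldl (fun acc m => acc + m) correction
    else
      (PySem.List.slice MONTHS_IN_REGULAR_YEAR none (some (PySem.List.pyGetD today 1 0 - 1))).foldl (fun acc m => acc + m) correction
  let correction :=
    if PySem.Int.mod (PySem.List.pyGetD given_day 0 0) 4 = 0 ∨ PySem.Int.mod (PySem.List.pyGetD given_day 0 0) 400 = 0 then
      (PySem.List.slice MONTHS_IN_LEAP_YEAR none (some (PySem.List.pyGetD given_day 1 0 - 1))).foldl (fun acc m => acc - m) correction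
    else
      (PySem.List.slice MONTHS_IN_REGULAR_YEAR none (some (PySem.List.pyGetD given_day 1 0 - 1))).foldl (fun acc m => acc - m) correction
  correction + PySem.List.pyGetD today 2 0 - PySem.List.pyGetD given_day 2 0

def calculate_days (today : List Int) (given_day : List Int) : Int :=
  let days_passed : Int := 0
  let days_passed :=
    (PySem.List.pyRange 0 (PySem.List.pyGetD today 0 0 - PySem.List.pyGetD given_day 0 0) 1).foldl
      (fun acc i =>
        if PySem.Int.mod (PySem.List.pyGetD given_day 0 0 + i) 4 = 0 ∨
           PySem.Int.mod (PySem.List.pyGetD given_day 0 0 + i) 400 = 0 then acc + 366 else acc + 365)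
      days_passed
  days_passed + days_correction today given_day

-- ===== PORT B =====
def regularB : List Int := [31, 28, 31, 30, 31, 30, 31, 31, 30, 31, 30, 31]
def leapB : List Int := [31, 29, 31, 30, 31, 30, 31, 31, 30, 31, 30, 31]

-- total days in the consecutive years y0 .. y1-1 (every fourth year is leap)
def spanDaysB (y0 y1 : Int) : Int :=
  if y1 ≤ y0 then 0
  else 365 * (y1 - y0) + (PySem.Int.floordiv (y1 - 1) 4 - PySem.Int.floordiv (y0 - 1) 4)

-- days elapsed in `year` up to `day` of `month`
def intoYearB (year month day : Int) : Int :=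
  let months := if PySem.Int.mod year 4 = 0 then leapB else regularB
  (PySem.List.slice months none (some (month - 1))).sum + day

def calculate_days_alt (today : List Int) (given_day : List Int) : Int :=
  spanDaysB (PySem.List.pyGetD given_day 0 0) (PySem.List.pyGetD today 0 0)
  + intoYearB (PySem.List.pyGetD today 0 0) (PySem.List.pyGetD today 1 0) (PySem.List.pyGetD today 2 0)
  - intoYearB (PySem.List.pyGetD given_day 0 0) (PySem.List.pyGetD given_day 1 0) (PySem.List.pyGetD given_day 2 0)

-- ===== PRECONDITION & SPEC =====
-- Pre_: A indexes both date lists at positions 0, 1, 2, so it raises IndexError on lists shorter than 3.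
def Pre_calculate_days (today : List Int) (given_day : List Int) : Prop :=
  3 ≤ today.length ∧ 3 ≤ given_day.length
instance (today : List Int) (given_day : List Int) : Decidable (Pre_calculate_days today given_day) := by unfold Pre_calculate_days; infer_instance
def pvWitness_calculate_days : List Int × List Int := ([2021, 5, 3], [2019, 2, 1])

def Spec_calculate_days (today : List Int) (given_day : List Int) (out : Int) : Prop := out = calculate_days_alt today given_day
instance (today : List Int) (given_day : List Int) (out : Int) : Decidable (Spec_calculate_days today given_day out) := by unfold Spec_calculate_days; infer_instance

-- ===== CLAIM (what is proved, stated in full; the proofs are below) =====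
def Claim_equal_calculate_days : Prop := ∀ (today : List Int) (given_day : List Int), Dom_calculate_days today given_day → Pre_calculate_days today given_day → Spec_calculate_days today given_day (calculate_days today given_day)

-- ===== LEMMAS AND PROOFS =====

-- leap test: `y % 400 == 0` is redundant next to `y % 4 == 0`
theorem leap_iff (y : Int) :
    (PySem.Int.mod y 4 = 0 ∨ PySem.Int.mod y 400 = 0) ↔ PySem.Int.mod y 4 = 0 := by
  rw [PySem.Int.mod_eq_emod_of_pos (by norm_num), PySem.Int.mod_eq_emod_of_pos (by norm_num)]
  constructor
  · rintro (h | h) <;> omega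
  · exact Or.inl

theorem leap_step (x : Int) :
    PySem.Int.floordiv x 4 - PySem.Int.floordiv (x - 1) 4 =
      (if PySem.Int.mod x 4 = 0 then 1 else 0) := by
  rw [PySem.Int.floordiv_eq_ediv_of_pos (by norm_num), PySem.Int.floordiv_eq_ediv_of_pos (by norm_num),
    PySem.Int.mod_eq_emod_of_pos (by norm_num)]
  split_ifs with h <;> omega

-- the per-year loop equals the closed form
theorem loop_closed (g : Int) (n : Nat) :
    (PySem.List.pyRange 0 (n : Int) 1).foldl
      (fun acc i => if PySem.Int.mod (g + i) 4 = 0 ∨ PySem.Int.mod (g + i) 400 = 0 then acc + 366 else acc + 365) 0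
    = 365 * n + (PySem.Int.floordiv (g + n - 1) 4 - PySem.Int.floordiv (g - 1) 4) := by
  induction n with
  | zero => simp [PySem.List.pyRange_one_eq_nil]
  | succ k ih =>
    rw [show ((k + 1 : Nat) : Int) = (k : Int) + 1 by omega,
      PySem.List.pyRange_one_succ_right (by exact_mod_cast Nat.zero_le k), List.foldl_append, ih]
    simp only [List.foldl_cons, List.foldl_nil, leap_iff]
    rw [show g + ((k : Int) + 1) - 1 = g + (k : Int) from by ring]
    have hstep := leap_step (g + (k : Int))
    split_ifs at hstep ⊢ with h <;> omega

-- the per-year loop equals B's spanDaysB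
theorem loop_span (g t : Int) :
    (PySem.List.pyRange 0 (t - g) 1).foldl
      (fun acc i => if PySem.Int.mod (g + i) 4 = 0 ∨ PySem.Int.mod (g + i) 400 = 0 then acc + 366 else acc + 365) 0
    = spanDaysB g t := by
  unfold spanDaysB
  by_cases h : t ≤ g
  · rw [PySem.List.pyRange_one_eq_nil (by omega : t - g ≤ 0), if_pos h]
    rfl
  · have hn : t - g = ((t - g).toNat : Int) := by omega
    rw [if_neg h, hn, loop_closed g (t - g).toNat,
      show g + ((t - g).toNat : Int) - 1 = t - 1 from by omega, ← hn]

-- shifting a foldl-sum's initial accumulator out front, and the foldl is the sum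
theorem foldl_add_eq (xs : List Int) (c : Int) :
    xs.foldl (fun acc x => acc + x) c = c + xs.sum := by
  induction xs generalizing c with
  | nil => simp
  | cons x t ih => simp only [List.foldl_cons, List.sum_cons, ih]; ring

-- a foldl that subtracts every element subtracts the sum
theorem foldl_sub_eq (xs : List Int) (c : Int) :
    xs.foldl (fun acc m => acc - m) c = c - xs.sum := by
  induction xs generalizing c with
  | nil => simp
  | cons x t ih => simp only [List.foldl_cons, List.sum_cons, ih]; ring

-- A's branched slice-sum equals B's intoYearB (minus the day term)
theorem corr_into (y m : Int) :
    (if PySem.Int.mod y 4 = 0 ∨ PySem.Int.mod y 400 = 0 then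
      (PySem.List.slice MONTHS_IN_LEAP_YEAR none (some (m - 1))).sum
     else
      (PySem.List.slice MONTHS_IN_REGULAR_YEAR none (some (m - 1))).sum)
    = intoYearB y m 0 := by
  unfold intoYearB
  simp only [leap_iff, show leapB = MONTHS_IN_LEAP_YEAR from rfl,
    show regularB = MONTHS_IN_REGULAR_YEAR from rfl, add_zero]
  split_ifs <;> rfl

theorem intoYearB_day (y m d : Int) : intoYearB y m d = intoYearB y m 0 + d := by
  unfold intoYearB; split_ifs <;> ring

theorem correction_eq (today given_day : List Int) :
    days_correction today given_day =
      intoYearB (PySem.List.pyGetD today 0 0) (PySem.List.pyGetD today 1 0) (PySem.List.pyGetD today 2 0)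
      - intoYearB (PySem.List.pyGetD given_day 0 0) (PySem.List.pyGetD given_day 1 0) (PySem.List.pyGetD given_day 2 0) := by
  simp only [days_correction, foldl_sub_eq, foldl_add_eq, zero_add]
  rw [intoYearB_day (PySem.List.pyGetD today 0 0), intoYearB_day (PySem.List.pyGetD given_day 0 0),
    ← corr_into (PySem.List.pyGetD today 0 0), ← corr_into (PySem.List.pyGetD given_day 0 0)]
  split_ifs <;> ring

-- ===== VERDICT (by name: the statement is the Claim_ definition above) =====
theorem calculate_days_spec : Claim_equal_calculate_days := by
  intro today given_day _ _
  unfold Spec_calculate_days calculate_days calculate_days_alt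
  simp only []
  rw [correction_eq, loop_span (PySem.List.pyGetD given_day 0 0) (PySem.List.pyGetD today 0 0)]
  ring
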